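-- pv_equiv track=rewrite | github.com/jkoren/CodeWarsChallengesPython | 15 - Strip Comments.py | solution
-- ===== SOURCE A (Python) =====
-- def solution(phrase, delimiters):
--     list_of_lines = phrase.split("\n")
--     # example output: ['apples, pears # and bananas', 'grapes', 'bananas !apples']
--     return_line = []
--     new_list_of_lines = []
--     for line in list_of_lines:
--             first_delimiter_index = -1
--             for delimiter in delimiters:
--                 if line.find(delimiter) != -1:  #if a delimiter is found
--                     if first_delimiter_index == -1: #this is the first delimiter found
--                         first_delimiter_index = line.find(delimiter)
--                     if first_delimiter_index != -1: # if already a delimiter found, take the earlier one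
--                         if line.find(delimiter) < first_delimiter_index:
--                             first_delimiter_index = line.find(delimiter)
--             if first_delimiter_index != -1: #if a delimiter was found
--                 if first_delimiter_index == 0: # if delimiter first character in line:
--                     return_line = ""
--                 else:
--                     return_line = line[:first_delimiter_index-1]
--             if first_delimiter_index == -1: ## no delimiter found
--                 return_line = line
--
--             new_list_of_lines.append(return_line)
--     if len(new_list_of_lines) == 1:
--         return new_list_of_lines[0]
--     else:
--         return "\n".join(new_list_of_lines)
-- ===== SOURCE B (Python) =====
-- def solution(phrase, delimiters):
--     # Scan each line position-by-position for the earliest spot where any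
--     # delimiter starts, instead of looping over delimiters with line.find.
--     def first_hit(line):
--         for j in range(len(line) + 1):
--             if any(line.startswith(d, j) for d in delimiters):
--                 return j
--         return -1
--
--     out = []
--     for line in phrase.split("\n"):
--         j = first_hit(line)
--         out.append(line if j == -1 else ("" if j == 0 else line[:j - 1]))
--     return "\n".join(out)
-- ===== Notes on version B (the rewrite author's own statement) =====
-- stated objective: faster
-- what changed: Instead of looping over delimiters and taking the minimum of full-line line.find results (called repeatedly per delimiter), B scans each line's positions left-to-right and stops at the first position where any delimiter starts (str.startswith with an offset), then applies the same truncation; the single-line special case collapses into an unconditional '\n'.join.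
import Mathlib
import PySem

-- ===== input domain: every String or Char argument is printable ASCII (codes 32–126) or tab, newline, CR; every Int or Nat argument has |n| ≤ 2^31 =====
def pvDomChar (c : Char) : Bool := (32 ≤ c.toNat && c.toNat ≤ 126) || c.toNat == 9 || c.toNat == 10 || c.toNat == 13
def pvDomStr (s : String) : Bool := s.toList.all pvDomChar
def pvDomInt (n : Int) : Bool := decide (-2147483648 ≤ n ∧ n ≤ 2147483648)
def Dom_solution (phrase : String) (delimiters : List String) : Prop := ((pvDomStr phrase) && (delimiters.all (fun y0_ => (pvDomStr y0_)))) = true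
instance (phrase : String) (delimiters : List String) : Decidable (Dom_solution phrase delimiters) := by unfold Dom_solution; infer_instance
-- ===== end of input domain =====

-- B re-implements A by scanning each line's positions for the first spot where any
-- delimiter starts (instead of minimising full-line line.find over delimiters); same values everywhere; a timing run measured B faster (early exit at the first match).
-- Both ports work on List Char (String via .toList; exact splitting/joining via PySem.Chars).

-- ===== PORT A =====
-- inner 'for delimiter in delimiters' body of A, literally
def stepA (line : List Char) (acc : Int) (d : List Char) : Int :=
  if PySem.Chars.find line d ≠ -1 then
    let a1 := if acc = -1 then PySem.Chars.find line d else acc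
    if a1 ≠ -1 then (if PySem.Chars.find line d < a1 then PySem.Chars.find line d else a1) else a1
  else acc

-- per-line body of A's outer loop
def procA (line : List Char) (ds : List (List Char)) : List Char :=
  let idx := ds.foldl (stepA line) (-1)
  if idx ≠ -1 then (if idx = 0 then [] else PySem.Chars.slice line none (some (idx - 1))) else line

def solution (phrase : String) (delimiters : List String) : String :=
  let newLines := (PySem.Chars.splitOn phrase.toList ['\n']).map
      (fun l => procA l (delimiters.map String.toList))
  if newLines.length = 1 then String.ofList (PySem.List.pyGetD newLines 0 [])
  else String.ofList (PySem.Chars.join ['\n'] newLines)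

-- ===== PORT B =====
-- any(line.startswith(d, j) for d in delimiters)
def hitB (line : List Char) (ds : List (List Char)) (j : Nat) : Bool :=
  ds.any (fun d => PySem.Chars.startswith (line.drop j) d)

-- 'for j in range(len(line)+1): … return j' / 'return -1' of B's first_hit
def scanB (line : List Char) (ds : List (List Char)) (j : Nat) : Int :=
  if j ≤ line.length then
    if hitB line ds j then (j : Int) else scanB line ds (j + 1)
  else -1
termination_by line.length + 1 - j

-- per-line body of B's loop
def procB (line : List Char) (ds : List (List Char)) : List Char :=
  let j := scanB line ds 0
  if j = -1 then line else if j = 0 then [] else line.take (j.toNat - 1)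

def solution_alt (phrase : String) (delimiters : List String) : String :=
  String.ofList (PySem.Chars.join ['\n']
    ((PySem.Chars.splitOn phrase.toList ['\n']).map
      (fun l => procB l (delimiters.map String.toList))))

-- ===== PRECONDITION & SPEC =====
def Spec_solution (phrase : String) (delimiters : List String) (out : String) : Prop := out = solution_alt phrase delimiters
instance (phrase : String) (delimiters : List String) (out : String) : Decidable (Spec_solution phrase delimiters out) := by unfold Spec_solution; infer_instance

-- ===== CLAIM (what is proved, stated in full; the proofs are below) =====
def Claim_equal_solution : Prop := ∀ (phrase : String) (delimiters : List String), Dom_solution phrase delimiters → Spec_solution phrase delimiters (solution phrase delimiters)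

-- ===== LEMMAS AND PROOFS =====

-- A's inner-loop body is 'combine acc (find line d)'
def combine (a f : Int) : Int :=
  if f = -1 then a else if a = -1 then f else if f < a then f else a

theorem stepA_eq_combine (line : List Char) (acc : Int) (d : List Char) :
    stepA line acc d = combine acc (PySem.Chars.find line d) := by
  unfold stepA combine
  have h := PySem.Chars.neg_one_le_find line d
  dsimp only
  split_ifs <;> omega

-- invariant of A's fold over delimiters
theorem fold_combine_spec (line : List Char) :
    ∀ (ds : List (List Char)) (acc : Int), -1 ≤ acc →
    (-1 ≤ ds.foldl (fun a d => combine a (PySem.Chars.find line d)) acc) ∧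
    ((ds.foldl (fun a d => combine a (PySem.Chars.find line d)) acc) = acc ∨
      ∃ d ∈ ds, PySem.Chars.find line d = ds.foldl (fun a d => combine a (PySem.Chars.find line d)) acc) ∧
    (∀ d ∈ ds, PySem.Chars.find line d ≠ -1 →
      (ds.foldl (fun a d => combine a (PySem.Chars.find line d)) acc) ≠ -1 ∧
      (ds.foldl (fun a d => combine a (PySem.Chars.find line d)) acc) ≤ PySem.Chars.find line d) ∧
    (acc ≠ -1 →
      (ds.foldl (fun a d => combine a (PySem.Chars.find line d)) acc) ≠ -1 ∧
      (ds.foldl (fun a d => combine a (PySem.Chars.find line d)) acc) ≤ acc) := by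
  intro ds
  induction ds with
  | nil => intro acc hacc; simp; omega
  | cons d ds ih =>
    intro acc hacc
    have hf := PySem.Chars.neg_one_le_find line d
    have hacc' : -1 ≤ combine acc (PySem.Chars.find line d) := by unfold combine; split_ifs <;> omega
    have hmem : combine acc (PySem.Chars.find line d) = acc ∨
        combine acc (PySem.Chars.find line d) = PySem.Chars.find line d := by
      unfold combine; split_ifs <;> omega
    have hle : PySem.Chars.find line d ≠ -1 →
        combine acc (PySem.Chars.find line d) ≠ -1 ∧
        combine acc (PySem.Chars.find line d) ≤ PySem.Chars.find line d := by
      intro hne; unfold combine; split_ifs <;> omega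
    have hacc2 : acc ≠ -1 →
        combine acc (PySem.Chars.find line d) ≠ -1 ∧
        combine acc (PySem.Chars.find line d) ≤ acc := by
      intro hne; unfold combine; split_ifs <;> omega
    obtain ⟨ih1, ih2, ih3, ih4⟩ := ih (combine acc (PySem.Chars.find line d)) hacc'
    refine ⟨by simpa using ih1, ?_, ?_, ?_⟩
    · simp only [List.foldl_cons]
      rcases ih2 with h | ⟨d', hd', hval⟩
      · rcases hmem with h2 | h2
        · left; omega
        · right; exact ⟨d, by simp, by omega⟩
      · right; exact ⟨d', by simp [hd'], hval⟩
    · intro d' hd' hne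
      simp only [List.foldl_cons]
      rcases List.mem_cons.mp hd' with rfl | hd'
      · obtain ⟨h1, h2⟩ := hle hne
        obtain ⟨h3, h4⟩ := ih4 h1
        exact ⟨h3, by omega⟩
      · exact ih3 d' hd' hne
    · intro hne
      simp only [List.foldl_cons]
      obtain ⟨h1, h2⟩ := hacc2 hne
      obtain ⟨h3, h4⟩ := ih4 h1
      exact ⟨h3, by omega⟩

-- a prefix of a suffix of line is found by find
theorem find_ne_of_prefix_drop (line d : List Char) (k : Nat) (h : d <+: line.drop k) :
    PySem.Chars.find line d ≠ -1 := by
  rw [PySem.Chars.find_ne_neg_one_iff, ← PySem.Chars.isIn_iff_infix,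
    ← PySem.Chars.exists_prefix_drop_iff_isIn]
  exact ⟨k, h⟩

theorem scanB_of_none (line : List Char) (ds : List (List Char)) :
    ∀ j, (∀ k, j ≤ k → k ≤ line.length → hitB line ds k = false) → scanB line ds j = -1 := by
  intro j
  induction hn : line.length + 1 - j using Nat.strong_induction_on generalizing j with
  | _ n ih =>
    intro hall
    rw [scanB]
    split_ifs with h1 h2
    · exact absurd (hall j le_rfl h1) (by simp [h2])
    · exact ih (line.length + 1 - (j + 1)) (by omega) (j + 1) rfl
        (fun k hk hk' => hall k (by omega) hk')
    · rfl

theorem scanB_of_hit (line : List Char) (ds : List (List Char)) :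
    ∀ j m : Nat, j ≤ m → m ≤ line.length → hitB line ds m = true →
    (∀ k, j ≤ k → k < m → hitB line ds k = false) → scanB line ds j = (m : Int) := by
  intro j m
  induction hn : m - j using Nat.strong_induction_on generalizing j with
  | _ n ih =>
    intro hjm hm hhit hbelow
    rw [scanB]
    rcases Nat.eq_or_lt_of_le hjm with rfl | hlt
    · simp [Nat.le_trans hjm hm, hhit]
    · have hj : j ≤ line.length := by omega
      have hnot : hitB line ds j = false := hbelow j le_rfl hlt
      simp only [hj, if_true, hnot, Bool.false_eq_true, if_false]
      exact ih (m - (j + 1)) (by omega) (j + 1) rfl hlt hm hhit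
        (fun k hk hk' => hbelow k (by omega) hk')

-- the heart: A's minimum-of-finds equals B's first-position scan
theorem foldA_eq_scanB (line : List Char) (ds : List (List Char)) :
    ds.foldl (stepA line) (-1) = scanB line ds 0 := by
  have hstep : stepA line = fun a d => combine a (PySem.Chars.find line d) := by
    funext a d; exact stepA_eq_combine line a d
  rw [hstep]
  obtain ⟨h1, h2, h3, _⟩ := fold_combine_spec line ds (-1) le_rfl
  set r := ds.foldl (fun a d => combine a (PySem.Chars.find line d)) (-1) with hr
  rcases eq_or_ne r (-1) with hneg | hpos
  · rw [hneg]
    symm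
    rw [show ((-1 : Int)) = -1 from rfl] at *
    refine scanB_of_none line ds 0 (fun k _ hk => ?_)
    by_contra hhit
    simp only [Bool.not_eq_false, hitB, List.any_eq_true] at hhit
    obtain ⟨d, hd, hsw⟩ := hhit
    have hpre := (PySem.Chars.startswith_iff _ _).mp hsw
    have := (h3 d hd (find_ne_of_prefix_drop line d k hpre)).1
    exact this hneg
  · have h0 : 0 ≤ r := by
      have : -1 ≤ r := h1
      omega
    rcases h2 with habs | ⟨d0, hd0, hval⟩
    · omega
    have hfind0 : 0 ≤ PySem.Chars.find line d0 := by omega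
    obtain ⟨hpre0, _⟩ := PySem.Chars.find_spec hfind0
    have hlen : r ≤ (line.length : Int) := hval ▸ PySem.Chars.find_le_length line d0
    have hm : r.toNat ≤ line.length := by omega
    have hhit : hitB line ds r.toNat = true := by
      simp only [hitB, List.any_eq_true]
      refine ⟨d0, hd0, (PySem.Chars.startswith_iff _ _).mpr ?_⟩
      have : (PySem.Chars.find line d0).toNat = r.toNat := by rw [hval]
      rwa [this] at hpre0
    have hbelow : ∀ k, 0 ≤ k → k < r.toNat → hitB line ds k = false := by
      intro k _ hk
      by_contra hhitk
      simp only [Bool.not_eq_false, hitB, List.any_eq_true] at hhitk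
      obtain ⟨d, hd, hsw⟩ := hhitk
      have hpre := (PySem.Chars.startswith_iff _ _).mp hsw
      have hne := find_ne_of_prefix_drop line d k hpre
      have hfge : 0 ≤ PySem.Chars.find line d := by
        have := PySem.Chars.neg_one_le_find line d; omega
      obtain ⟨_, hmin⟩ := PySem.Chars.find_spec hfge
      have hkge : (PySem.Chars.find line d).toNat ≤ k := by
        by_contra hklt
        exact hmin k (by omega) hpre
      have hrle := (h3 d hd hne).2
      omega
    have := scanB_of_hit line ds 0 r.toNat (Nat.zero_le _) hm hhit hbelow
    rw [this]; omega

theorem scanB_ge (line : List Char) (ds : List (List Char)) :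
    ∀ j, -1 ≤ scanB line ds j := by
  intro j
  induction hn : line.length + 1 - j using Nat.strong_induction_on generalizing j with
  | _ n ih =>
    rw [scanB]
    split_ifs with h1 h2
    · omega
    · exact ih (line.length + 1 - (j + 1)) (by omega) (j + 1) rfl
    · omega

theorem procA_eq_procB (line : List Char) (ds : List (List Char)) :
    procA line ds = procB line ds := by
  unfold procA procB
  rw [foldA_eq_scanB]
  have hge : -1 ≤ scanB line ds 0 := scanB_ge line ds 0
  set j := scanB line ds 0 with hj
  rcases eq_or_ne j (-1) with h | h
  · simp [h]
  · rcases eq_or_ne j 0 with h0 | h0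
    · simp [h0]
    · have h1 : 1 ≤ j := by omega
      simp only [if_pos h, if_neg h, if_neg h0]
      rw [PySem.Chars.slice_eq_listSlice, PySem.List.slice_to line (by omega : (0:Int) ≤ j - 1)]
      congr 1
      omega

-- ===== VERDICT (by name: the statement is the Claim_ definition above) =====
theorem solution_spec : Claim_equal_solution := by
  intro phrase delimiters _
  unfold Spec_solution solution solution_alt
  have hmap : ∀ l, procA l (delimiters.map String.toList) = procB l (delimiters.map String.toList) :=
    fun l => procA_eq_procB l _
  simp only [hmap]
  split_ifs with h1
  · obtain ⟨x, hx⟩ := List.length_eq_one_iff.mp h1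
    rw [hx, PySem.Chars.join_singleton]
    simp [PySem.List.pyGetD_zero]
  · rfl
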